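-- pv_equiv track=rewrite | github.com/heyyousa/django-cxyybbs | test.py | maskip
-- ===== SOURCE A (Python) =====
-- def maskip(userip):
--     a = []
--
--     for i in range(len(userip)):
--         a.append(userip[i])
--
--     b = ''
--     num = 0
--     for j in range(len(userip)):
--         if a[j] == '.':
--             num += 1
--         if num != 2:
--             b += a[j]
--         elif num == 2:
--             if a[j] == '.':
--                 b += a[j]
--             else:
--                 b += '*'
--
--     return b
-- ===== SOURCE B (Python) =====
-- def maskip(userip):
--     parts = userip.split('.')
--     if len(parts) >= 3:
--         parts[2] = '*' * len(parts[2])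
--     return '.'.join(parts)
-- ===== Notes on version B (the rewrite author's own statement) =====
-- stated objective: idiomatic
-- what changed: Replaces the char-by-char dot-counting scan (with its redundant list-copy pass) by split('.') / mask the third token / '.'.join.
import Mathlib
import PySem

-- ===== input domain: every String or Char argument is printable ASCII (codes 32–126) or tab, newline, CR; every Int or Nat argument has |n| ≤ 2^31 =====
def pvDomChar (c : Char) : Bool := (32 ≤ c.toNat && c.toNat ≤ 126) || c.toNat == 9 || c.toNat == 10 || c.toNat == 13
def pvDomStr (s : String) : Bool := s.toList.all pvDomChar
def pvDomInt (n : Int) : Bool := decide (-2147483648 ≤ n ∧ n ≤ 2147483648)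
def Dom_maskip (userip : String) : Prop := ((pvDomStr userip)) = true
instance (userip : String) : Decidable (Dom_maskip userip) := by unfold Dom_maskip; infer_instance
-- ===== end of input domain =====

-- B replaces A's char-by-char dot-counting scan by split('.') / mask the third token / join ('idiomatic').

-- ===== PORT A =====
-- A's second loop: walk the copied char list, counting dots in `num`,
-- appending to the accumulator `b` exactly as A's branches do
def maskipGo : List Char → Int → List Char → List Char
  | [], _, b => b
  | c :: rest, num, b =>
    let num' : Int := if c = '.' then num + 1 else num
    if num' ≠ 2 then maskipGo rest num' (b ++ [c])
    else if c = '.' then maskipGo rest num' (b ++ [c])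
    else maskipGo rest num' (b ++ ['*'])

def maskip (userip : String) : String :=
  -- A's first loop: a = the list of userip's characters
  let a := userip.toList
  String.mk (maskipGo a 0 [])

-- ===== PORT B =====
def maskip_alt (userip : String) : String :=
  let parts := PySem.Chars.splitOn userip.toList ['.']
  let parts := if parts.length ≥ 3
    then parts.modify 2 (fun p => List.replicate p.length '*')   -- parts[2] = '*' * len(parts[2])
    else parts
  String.mk (PySem.Chars.join ['.'] parts)

-- ===== PRECONDITION & SPEC =====
def Spec_maskip (userip : String) (out : String) : Prop := out = maskip_alt userip
instance (userip : String) (out : String) : Decidable (Spec_maskip userip out) := by unfold Spec_maskip; infer_instance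

-- ===== CLAIM (what is proved, stated in full; the proofs are below) =====
def Claim_equal_maskip : Prop := ∀ (userip : String), Dom_maskip userip → Spec_maskip userip (maskip userip)

-- ===== LEMMAS AND PROOFS =====

/-- Simple recursive splitting of a char list at '.'. -/
def splitDot : List Char → List (List Char)
  | [] => [[]]
  | c :: rest => if c = '.' then [] :: splitDot rest else (splitDot rest).modifyHead (c :: ·)

def consHead (p : List Char) : List (List Char) → List (List Char)
  | [] => [p]
  | x :: xs => (p ++ x) :: xs

def stars (q : List Char) : List Char := List.replicate q.length '*'

/-- Mask every part whose absolute index (starting at `num`) is 2. -/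
def maskFrom (num : Int) : List (List Char) → List (List Char)
  | [] => []
  | q :: qs => (if num = 2 then stars q else q) :: maskFrom (num + 1) qs

lemma splitDot_ne_nil (l : List Char) : splitDot l ≠ [] := by
  cases l with
  | nil => simp [splitDot]
  | cons c rest =>
    simp only [splitDot]
    split
    · simp
    · cases h : splitDot rest with
      | nil => exact absurd h (splitDot_ne_nil rest)
      | cons x xs => simp [List.modifyHead]

lemma consHead_nil_of_ne_nil (xs : List (List Char)) (h : xs ≠ []) : consHead [] xs = xs := by
  cases xs with
  | nil => exact absurd rfl h
  | cons x t => simp [consHead]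

lemma go_dot (fuel : Nat) (l cur : List Char) (acc : List (List Char)) (h : l.length < fuel) :
    PySem.Chars.splitOn.go ['.'] fuel l cur acc =
      acc.reverse ++ consHead cur.reverse (splitDot l) := by
  induction fuel generalizing l cur acc with
  | zero => omega
  | succ f ih =>
    cases l with
    | nil =>
      rw [PySem.Chars.splitOn.go.eq_def]
      simp [splitDot, consHead]
    | cons c rest =>
      rw [PySem.Chars.splitOn.go.eq_def]
      by_cases hc : c = '.'
      · subst hc
        have hpre : List.isPrefixOf ['.'] ('.' :: rest) = true := by
          simp [List.isPrefixOf]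
        simp only [hpre, if_pos]
        have hdrop : List.drop ['.'].length ('.' :: rest) = rest := rfl
        rw [hdrop, ih rest [] (cur.reverse :: acc) (by simpa using Nat.lt_of_succ_lt_succ h)]
        cases hs : splitDot rest with
        | nil => exact absurd hs (splitDot_ne_nil rest)
        | cons x xs => simp [splitDot, consHead, hs]
      · have hpre : List.isPrefixOf ['.'] (c :: rest) = false := by
          simp [List.isPrefixOf]
          exact fun hx => hc hx.symm
        simp only [hpre, Bool.false_eq_true, if_false]
        rw [ih rest (c :: cur) acc (by simpa using Nat.lt_of_succ_lt_succ h)]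
        cases hs : splitDot rest with
        | nil => exact absurd hs (splitDot_ne_nil rest)
        | cons x xs =>
          simp [splitDot, hc, hs, consHead, List.modifyHead]

lemma splitOn_eq_splitDot (l : List Char) :
    PySem.Chars.splitOn l ['.'] = splitDot l := by
  have := go_dot (l.length + 1) l [] [] (Nat.lt_succ_self _)
  simp only [List.reverse_nil, List.nil_append] at this
  rw [PySem.Chars.splitOn, this, consHead_nil_of_ne_nil _ (splitDot_ne_nil l)]

lemma maskipGo_append (l : List Char) (num : Int) (b : List Char) :
    maskipGo l num b = b ++ maskipGo l num [] := by
  induction l generalizing num b with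
  | nil => simp [maskipGo]
  | cons c rest ih =>
    simp only [maskipGo]
    split
    · rw [ih _ (b ++ [c]), ih _ ([] ++ [c])]; simp
    · split
      · rw [ih _ (b ++ [c]), ih _ ([] ++ [c])]; simp
      · rw [ih _ (b ++ ['*']), ih _ ([] ++ ['*'])]; simp

lemma intercalate_consHead_cons (sep p x : List Char) (xs : List (List Char)) :
    List.intercalate sep ((p ++ x) :: xs) = p ++ List.intercalate sep (x :: xs) := by
  cases xs <;> simp [List.intercalate, List.intersperse]

lemma intercalate_nil_cons (y : List Char) (ys : List (List Char)) :
    List.intercalate ['.'] (([] : List Char) :: y :: ys) =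
      '.' :: List.intercalate ['.'] (y :: ys) := by
  cases ys <;> simp [List.intercalate, List.intersperse]

lemma maskFrom_ne_nil (num : Int) (xs : List (List Char)) (h : xs ≠ []) :
    maskFrom num xs ≠ [] := by
  cases xs with
  | nil => exact absurd rfl h
  | cons x t => simp [maskFrom]

lemma loopA_eq (l : List Char) (num : Int) :
    maskipGo l num [] = List.intercalate ['.'] (maskFrom num (splitDot l)) := by
  induction l generalizing num with
  | nil =>
    have hmask : (if num = 2 then stars ([] : List Char) else []) = ([] : List Char) := by
      split <;> simp [stars]
    simp [maskipGo, splitDot, maskFrom, hmask, List.intercalate]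
  | cons c rest ih =>
    by_cases hc : c = '.'
    · subst hc
      have hgo : maskipGo ('.' :: rest) num [] = '.' :: maskipGo rest (num + 1) [] := by
        simp only [maskipGo, if_true]
        rw [maskipGo_append rest (num + 1) ([] ++ ['.'])]
        split
        · simp
        · simp
      rw [hgo, ih]
      have hsd : splitDot ('.' :: rest) = [] :: splitDot rest := by simp [splitDot]
      rw [hsd]
      have hmask : (if num = 2 then stars ([] : List Char) else []) = ([] : List Char) := by
        split <;> simp [stars]
      show _ = List.intercalate ['.'] (maskFrom num ([] :: splitDot rest))
      rw [show maskFrom num ([] :: splitDot rest)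
            = [] :: maskFrom (num + 1) (splitDot rest) by simp [maskFrom, hmask]]
      cases hm : maskFrom (num + 1) (splitDot rest) with
      | nil => exact absurd hm (maskFrom_ne_nil _ _ (splitDot_ne_nil rest))
      | cons y ys => rw [intercalate_nil_cons]
    · cases hs : splitDot rest with
      | nil => exact absurd hs (splitDot_ne_nil rest)
      | cons x xs =>
        have hsd : splitDot (c :: rest) = (c :: x) :: xs := by
          simp [splitDot, hc, hs, List.modifyHead]
        have hnum : (if c = '.' then num + 1 else num) = num := by simp [hc]
        by_cases h2 : num = 2
        · have hgo : maskipGo (c :: rest) num [] = '*' :: maskipGo rest num [] := by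
            simp only [maskipGo, hnum]
            rw [if_neg (by simp [h2]), if_neg hc, maskipGo_append]; rfl
          rw [hgo, ih, hsd, hs]
          rw [show maskFrom num ((c :: x) :: xs)
                = ('*' :: stars x) :: maskFrom (num + 1) xs by
              simp [maskFrom, h2, stars, List.replicate]]
          rw [show maskFrom num (x :: xs) = stars x :: maskFrom (num + 1) xs by
              simp [maskFrom, h2]]
          rw [show ('*' :: stars x) = ['*'] ++ stars x from rfl, intercalate_consHead_cons]
          rfl
        · have hgo : maskipGo (c :: rest) num [] = c :: maskipGo rest num [] := by
            simp only [maskipGo, hnum]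
            rw [if_pos (by simpa using h2), maskipGo_append]; rfl
          rw [hgo, ih, hsd, hs]
          rw [show maskFrom num ((c :: x) :: xs)
                = (c :: x) :: maskFrom (num + 1) xs by simp [maskFrom, h2]]
          rw [show maskFrom num (x :: xs) = x :: maskFrom (num + 1) xs by
              simp [maskFrom, h2]]
          rw [show (c :: x) = [c] ++ x from rfl, intercalate_consHead_cons]
          rfl

lemma maskFrom_of_ge (k : Int) (h : 3 ≤ k) (t : List (List Char)) : maskFrom k t = t := by
  induction t generalizing k with
  | nil => rfl
  | cons q qs ih =>
    simp only [maskFrom]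
    rw [if_neg (by omega), ih (k + 1) (by omega)]

lemma maskFrom_zero (ps : List (List Char)) : maskFrom 0 ps = ps.modify 2 stars := by
  rcases ps with _ | ⟨a, _ | ⟨b, _ | ⟨c, t⟩⟩⟩
  · rfl
  · simp [maskFrom, List.modify]
  · simp [maskFrom, List.modify]
  · simp [maskFrom, List.modify, maskFrom_of_ge 3 (by omega) t]

lemma modify_of_short (ps : List (List Char)) (h : ps.length < 3) :
    ps.modify 2 stars = ps := by
  rcases ps with _ | ⟨a, _ | ⟨b, _ | ⟨c, t⟩⟩⟩
  · rfl
  · rfl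
  · rfl
  · simp at h; omega

-- ===== VERDICT (by name: the statement is the Claim_ definition above) =====
theorem maskip_spec : Claim_equal_maskip := by
  intro userip _
  show String.mk (maskipGo userip.toList 0 []) = maskip_alt userip
  show _ = String.mk (PySem.Chars.join ['.']
    (if (PySem.Chars.splitOn userip.toList ['.']).length ≥ 3
      then (PySem.Chars.splitOn userip.toList ['.']).modify 2
        (fun p => List.replicate p.length '*')
      else PySem.Chars.splitOn userip.toList ['.']))
  rw [splitOn_eq_splitDot, loopA_eq, maskFrom_zero]
  by_cases h : (splitDot userip.toList).length ≥ 3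
  · rw [if_pos h]; rfl
  · rw [if_neg h, modify_of_short _ (by omega)]; rfl
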